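-- pv_equiv track=rewrite | github.com/adam-nice/Hilbert-system-proof-generator | formal_proof_printer.py | generate_wff_basis
-- ===== SOURCE A (Python) =====
-- def generate_wff_basis(max_depth=1):
--     """
--     Generates a set of all WFFs up to a given depth
--     using atoms {'a', 'b'}.
--
--     NOTE: max_depth=2 generates 74 formulas, which creates a
--     search space so large (trillions of trillions of proofs)
--     that it is impossible to compute. This function is
--     provided for demonstration, not for use.
--     """
--     atoms = {'a', 'b'}
--     wffs_by_depth = {0: atoms}
--     all_wffs = set(atoms)
--
--     for depth in range(1, max_depth + 1):
--         wffs_by_depth[depth] = set()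
--
--         # Add formulas of the form (¬A)
--         # where depth(A) == depth - 1
--         for a in wffs_by_depth[depth - 1]:
--             wffs_by_depth[depth].add(f"(¬{a})")
--
--         # Add formulas of the form (A → B)
--         # where max(depth(A), depth(B)) == depth - 1
--         for i in range(depth):
--             j = depth - 1
--             # Case 1: depth(A) = i, depth(B) = j
--             for a in wffs_by_depth[i]:
--                 for b in wffs_by_depth[j]:
--                     wffs_by_depth[depth].add(f"({a} → {b})")
--
--             if i != j:
--                 # Case 2: depth(A) = j, depth(B) = i
--                 for a in wffs_by_depth[j]:
--                     for b in wffs_by_depth[i]: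
--                         wffs_by_depth[depth].add(f"({a} → {b})")
--
--         all_wffs.update(wffs_by_depth[depth])
--
--     return sorted(list(all_wffs))
-- ===== SOURCE B (Python) =====
-- def generate_wff_basis(max_depth=1):
--     """Same WFF enumeration, but with a single cumulative set instead of
--     per-depth layers: after k rounds the set holds exactly the WFFs of
--     depth <= k, so regenerating from the whole set each round covers all
--     the i/j depth combinations A enumerates explicitly."""
--     all_wffs = {'a', 'b'}
--     for _ in range(max_depth):
--         new = {f"(\u00ac{a})" for a in all_wffs}
--         new.update(f"({a} \u2192 {b})" for a in all_wffs for b in all_wffs)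
--         all_wffs |= new
--     return sorted(all_wffs)
-- ===== Notes on version B (the rewrite author's own statement) =====
-- stated objective: simpler
-- what changed: Replaces A's per-depth dictionary of layers and its two symmetric i/j implication loops with a single cumulative set that is regenerated from itself max_depth times; after k rounds the set is exactly the WFFs of depth <= k, so all cross-depth combinations come out of one negation pass and one double loop over the whole set.
import Mathlib
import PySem

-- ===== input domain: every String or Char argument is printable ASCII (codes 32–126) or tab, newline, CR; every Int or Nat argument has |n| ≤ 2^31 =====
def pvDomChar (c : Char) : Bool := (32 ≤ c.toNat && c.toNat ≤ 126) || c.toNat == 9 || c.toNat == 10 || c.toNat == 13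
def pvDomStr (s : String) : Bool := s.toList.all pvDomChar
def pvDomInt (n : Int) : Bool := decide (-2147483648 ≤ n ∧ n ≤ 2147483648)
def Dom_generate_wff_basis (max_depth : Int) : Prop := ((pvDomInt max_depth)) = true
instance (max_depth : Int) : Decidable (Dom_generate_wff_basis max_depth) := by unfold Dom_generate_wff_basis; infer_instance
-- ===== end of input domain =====

-- B replaces A's per-depth dictionary of layers (and its two symmetric i/j implication loops)
-- with one cumulative set regenerated from itself each round (objective: simpler; same output).

-- ===== PORT A =====
-- shared f-string helpers: f"(¬{a})" and f"({a} → {b})"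
def pvNeg (a : String) : String := "(¬" ++ a ++ ")"
def pvImp (a b : String) : String := "(" ++ a ++ " → " ++ b ++ ")"

-- Loop body of A's 'for depth in range(1, max_depth + 1)'.  Python sets wffs_by_depth[depth] = set()
-- and then mutates that set in place; since the body only READS keys < depth, building the set and
-- inserting it once at the end is value-equal.  The keys read (depth-1, i, j) are always present,
-- so getD's default is never used.
def pvStepA (st : PySem.Dict Int (PySem.Set String) × PySem.Set String) (depth : Int) :
    PySem.Dict Int (PySem.Set String) × PySem.Set String :=
  let w := st.1
  let layer : PySem.Set String := PySem.Set.empty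
  -- for a in wffs_by_depth[depth - 1]: add f"(¬{a})"
  let layer := (w.getD (depth - 1) PySem.Set.empty).foldl
      (fun s a => PySem.Set.add s (pvNeg a)) layer
  -- for i in range(depth): j = depth - 1; case 1; if i != j: case 2
  let layer := (PySem.List.pyRange 0 depth 1).foldl (fun s i =>
      let j := depth - 1
      let s := (w.getD i PySem.Set.empty).foldl (fun s a =>
        (w.getD j PySem.Set.empty).foldl (fun s b => PySem.Set.add s (pvImp a b)) s) s
      if i ≠ j then
        (w.getD j PySem.Set.empty).foldl (fun s a =>
          (w.getD i PySem.Set.empty).foldl (fun s b => PySem.Set.add s (pvImp a b)) s) s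
      else s) layer
  (w.insert depth layer, PySem.Set.update st.2 layer)

def generate_wff_basis (max_depth : Int) : List String :=
  let atoms : PySem.Set String := PySem.Set.ofList ["a", "b"]
  let st := (PySem.List.pyRange 1 (max_depth + 1) 1).foldl pvStepA
      ((PySem.Dict.empty : PySem.Dict Int (PySem.Set String)).insert 0 atoms,
       PySem.Set.ofList atoms)
  PySem.List.sorted st.2 (fun x => x) false

-- ===== PORT B =====
-- one round of Source B's loop: new = {negations} ∪ {implications over the whole set}; all |= new
def pvStepB (all : PySem.Set String) (_depth : Int) : PySem.Set String :=
  let new := all.foldl (fun s a => PySem.Set.add s (pvNeg a)) PySem.Set.empty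
  let new := all.foldl (fun s a =>
      all.foldl (fun s b => PySem.Set.add s (pvImp a b)) s) new
  PySem.Set.union all new

def generate_wff_basis_alt (max_depth : Int) : List String :=
  let all := (PySem.List.pyRange 0 max_depth 1).foldl pvStepB (PySem.Set.ofList ["a", "b"])
  PySem.List.sorted all (fun x => x) false

-- ===== PRECONDITION & SPEC =====
def Spec_generate_wff_basis (max_depth : Int) (out : List String) : Prop := out = generate_wff_basis_alt max_depth
instance (max_depth : Int) (out : List String) : Decidable (Spec_generate_wff_basis max_depth out) := by unfold Spec_generate_wff_basis; infer_instance

-- ===== CLAIM (what is proved, stated in full; the proofs are below) =====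
def Claim_equal_generate_wff_basis : Prop := ∀ (max_depth : Int), Dom_generate_wff_basis max_depth → Spec_generate_wff_basis max_depth (generate_wff_basis max_depth)

-- ===== LEMMAS AND PROOFS =====

-- WFFs of depth ≤ n, as a predicate on the produced strings.
def pvC : Nat → String → Prop
  | 0, x => x = "a" ∨ x = "b"
  | n + 1, x => pvC n x ∨ (∃ a, pvC n a ∧ x = pvNeg a) ∨
      (∃ a b, pvC n a ∧ pvC n b ∧ x = pvImp a b)

lemma pvC_mono {m n : Nat} (h : m ≤ n) {x : String} (hx : pvC m x) : pvC n x := by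
  induction n with
  | zero =>
    have : m = 0 := by omega
    subst this; exact hx
  | succ n ih =>
    rcases Nat.lt_or_ge m (n + 1) with hm | hm
    · exact Or.inl (ih (by omega))
    · have : m = n + 1 := by omega
      subst this; exact hx

-- membership after the nested 'for a in out: for b in inn: s.add(f a b)' loop
lemma pv_mem_foldl_add2 (out inn : List String) (f : String → String → String)
    (s0 : PySem.Set String) (x : String) :
    x ∈ out.foldl (fun s a => inn.foldl (fun s b => PySem.Set.add s (f a b)) s) s0 ↔
      x ∈ s0 ∨ ∃ a ∈ out, ∃ b ∈ inn, x = f a b := by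
  induction out generalizing s0 with
  | nil => simp
  | cons a t ih =>
    simp only [List.foldl_cons, ih, PySem.Set.mem_foldl_add, List.mem_cons]
    aesop

-- the set A's loop body stores at wffs_by_depth[depth]
def pvLayer (st : PySem.Dict Int (PySem.Set String) × PySem.Set String) (depth : Int) :
    PySem.Set String :=
  let w := st.1
  let layer : PySem.Set String := PySem.Set.empty
  let layer := (w.getD (depth - 1) PySem.Set.empty).foldl
      (fun s a => PySem.Set.add s (pvNeg a)) layer
  (PySem.List.pyRange 0 depth 1).foldl (fun s i =>
      let j := depth - 1
      let s := (w.getD i PySem.Set.empty).foldl (fun s a =>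
        (w.getD j PySem.Set.empty).foldl (fun s b => PySem.Set.add s (pvImp a b)) s) s
      if i ≠ j then
        (w.getD j PySem.Set.empty).foldl (fun s a =>
          (w.getD i PySem.Set.empty).foldl (fun s b => PySem.Set.add s (pvImp a b)) s) s
      else s) layer

lemma pvStepA_eq (st : PySem.Dict Int (PySem.Set String) × PySem.Set String) (depth : Int) :
    pvStepA st depth = (st.1.insert depth (pvLayer st depth),
      PySem.Set.update st.2 (pvLayer st depth)) := rfl

-- membership after A's 'for i in range(depth)' implication loop, over an arbitrary index list
lemma pv_mem_impLoop (w : PySem.Dict Int (PySem.Set String)) (depth : Int) (is : List Int)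
    (s0 : PySem.Set String) (x : String) :
    x ∈ is.foldl (fun s i =>
      let j := depth - 1
      let s := (w.getD i PySem.Set.empty).foldl (fun s a =>
        (w.getD j PySem.Set.empty).foldl (fun s b => PySem.Set.add s (pvImp a b)) s) s
      if i ≠ j then
        (w.getD j PySem.Set.empty).foldl (fun s a =>
          (w.getD i PySem.Set.empty).foldl (fun s b => PySem.Set.add s (pvImp a b)) s) s
      else s) s0 ↔
    x ∈ s0 ∨ ∃ i ∈ is,
      ((∃ a ∈ w.getD i PySem.Set.empty, ∃ b ∈ w.getD (depth - 1) PySem.Set.empty, x = pvImp a b) ∨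
       (i ≠ depth - 1 ∧ ∃ a ∈ w.getD (depth - 1) PySem.Set.empty,
          ∃ b ∈ w.getD i PySem.Set.empty, x = pvImp a b)) := by
  induction is generalizing s0 with
  | nil => simp
  | cons i t ih =>
    simp only [List.foldl_cons]
    by_cases hij : i = depth - 1
    · subst hij
      rw [if_neg (by omega)]
      simp only [ih, List.exists_mem_cons_iff, pv_mem_foldl_add2, ne_eq,
        not_true_eq_false, false_and, or_false, or_assoc]
    · rw [if_pos hij]
      simp only [ih, List.exists_mem_cons_iff, pv_mem_foldl_add2, ne_eq, hij,
        not_false_eq_true, true_and, or_assoc]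

lemma pv_mem_layer (st : PySem.Dict Int (PySem.Set String) × PySem.Set String)
    (depth : Int) (x : String) :
    x ∈ pvLayer st depth ↔
      (∃ a ∈ st.1.getD (depth - 1) PySem.Set.empty, x = pvNeg a) ∨
      ∃ i : Int, (0 ≤ i ∧ i < depth) ∧
        ((∃ a ∈ st.1.getD i PySem.Set.empty, ∃ b ∈ st.1.getD (depth - 1) PySem.Set.empty,
            x = pvImp a b) ∨
         (i ≠ depth - 1 ∧ ∃ a ∈ st.1.getD (depth - 1) PySem.Set.empty,
            ∃ b ∈ st.1.getD i PySem.Set.empty, x = pvImp a b)) := by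
  simp only [pvLayer, pv_mem_impLoop, PySem.Set.mem_foldl_add, PySem.List.mem_pyRange_one]
  simp [PySem.Set.empty]

-- A's loop invariant after n iterations
def pvInv (n : Nat) (st : PySem.Dict Int (PySem.Set String) × PySem.Set String) : Prop :=
  (∀ d : Nat, d ≤ n → ∀ x ∈ st.1.getD (d : Int) PySem.Set.empty, pvC d x) ∧
  (∀ d : Nat, d < n → ∀ a ∈ st.1.getD (d : Int) PySem.Set.empty,
      pvNeg a ∈ st.1.getD ((d : Int) + 1) PySem.Set.empty) ∧
  (∀ d i : Nat, d < n → i ≤ d → ∀ a ∈ st.1.getD (i : Int) PySem.Set.empty,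
      ∀ b ∈ st.1.getD (d : Int) PySem.Set.empty,
      pvImp a b ∈ st.1.getD ((d : Int) + 1) PySem.Set.empty ∧
      pvImp b a ∈ st.1.getD ((d : Int) + 1) PySem.Set.empty) ∧
  (∀ x, x ∈ st.2 ↔ ∃ d : Nat, d ≤ n ∧ x ∈ st.1.getD (d : Int) PySem.Set.empty) ∧
  (∀ x, x ∈ st.2 ↔ pvC n x) ∧
  st.2.Nodup

def pvInitA : PySem.Dict Int (PySem.Set String) × PySem.Set String :=
  ((PySem.Dict.empty : PySem.Dict Int (PySem.Set String)).insert 0 (PySem.Set.ofList ["a", "b"]),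
   PySem.Set.ofList (PySem.Set.ofList ["a", "b"]))

lemma pvInv_zero : pvInv 0 pvInitA := by
  refine ⟨?_, by intro d hd; omega, by intro d i hd; omega, ?_, ?_, ?_⟩
  · intro d hd x hx
    have hd0 : d = 0 := by omega
    subst hd0
    simpa [pvC, PySem.Dict.getD_insert_self, PySem.Set.mem_ofList, pvInitA] using hx
  · intro x
    simp [pvInitA, PySem.Dict.getD_insert_self, PySem.Set.mem_ofList]
  · intro x
    simp [pvInitA, pvC, PySem.Set.mem_ofList]
  · exact PySem.Set.nodup_ofList _

lemma pvC_succ (n : Nat) (x : String) :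
    pvC (n + 1) x ↔ pvC n x ∨ (∃ a, pvC n a ∧ x = pvNeg a) ∨
      (∃ a b, pvC n a ∧ pvC n b ∧ x = pvImp a b) := Iff.rfl

lemma pvInv_step (n : Nat) (st : PySem.Dict Int (PySem.Set String) × PySem.Set String)
    (h : pvInv n st) : pvInv (n + 1) (pvStepA st ((n : Int) + 1)) := by
  obtain ⟨hsound, hneg, himp, hall, hC, hnd⟩ := h
  rw [pvStepA_eq]
  set L := pvLayer st ((n : Int) + 1) with hLdef
  have hL : ∀ x, x ∈ L ↔
      (∃ a ∈ st.1.getD (n : Int) PySem.Set.empty, x = pvNeg a) ∨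
      ∃ i : Int, (0 ≤ i ∧ i < (n : Int) + 1) ∧
        ((∃ a ∈ st.1.getD i PySem.Set.empty, ∃ b ∈ st.1.getD (n : Int) PySem.Set.empty,
            x = pvImp a b) ∨
         (i ≠ (n : Int) ∧ ∃ a ∈ st.1.getD (n : Int) PySem.Set.empty,
            ∃ b ∈ st.1.getD i PySem.Set.empty, x = pvImp a b)) := by
    intro x
    have h0 := pv_mem_layer st ((n : Int) + 1) x
    rwa [show ((n : Int) + 1) - 1 = (n : Int) by ring] at h0
  have hget : ∀ k : Int, (st.1.insert ((n : Int) + 1) L).getD k PySem.Set.empty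
      = if k = (n : Int) + 1 then L else st.1.getD k PySem.Set.empty :=
    fun k => PySem.Dict.getD_insert _ _ _ _ _
  have hgetlow : ∀ d : Nat, d ≤ n → (st.1.insert ((n : Int) + 1) L).getD (d : Int) PySem.Set.empty
      = st.1.getD (d : Int) PySem.Set.empty := by
    intro d hd; rw [hget, if_neg (by omega)]
  have hgettop : (st.1.insert ((n : Int) + 1) L).getD ((n : Int) + 1) PySem.Set.empty = L := by
    rw [hget, if_pos rfl]
  have hLsound : ∀ x ∈ L, pvC (n + 1) x := by
    intro x hx
    rw [pvC_succ]
    rcases (hL x).1 hx with ⟨a, ha, rfl⟩ | ⟨i, ⟨hi0, hilt⟩, hcase⟩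
    · exact Or.inr (Or.inl ⟨a, hsound n le_rfl a ha, rfl⟩)
    · lift i to Nat using hi0 with i'
      have hin : i' ≤ n := by omega
      rcases hcase with ⟨a, ha, b, hb, rfl⟩ | ⟨-, a, ha, b, hb, rfl⟩
      · exact Or.inr (Or.inr ⟨a, b, pvC_mono hin (hsound i' hin a ha), hsound n le_rfl b hb, rfl⟩)
      · exact Or.inr (Or.inr ⟨a, b, hsound n le_rfl a ha, pvC_mono hin (hsound i' hin b hb), rfl⟩)
  unfold pvInv
  refine ⟨?_, ?_, ?_, ?_, ?_, PySem.Set.nodup_update _ _ hnd⟩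
  · -- soundness of every stored layer
    intro d hd x hx
    rcases Nat.lt_or_ge d (n + 1) with hdn | hdn
    · have hdn' : d ≤ n := by omega
      rw [hgetlow d hdn'] at hx
      exact hsound d hdn' x hx
    · have hdeq : d = n + 1 := by omega
      subst hdeq
      rw [show ((n + 1 : Nat) : Int) = (n : Int) + 1 by push_cast; ring, hgettop] at hx
      exact hLsound x hx
  · -- negation closure
    intro d hd a ha
    rcases Nat.lt_or_ge d n with hdn | hdn
    · rw [hgetlow d (by omega)] at ha
      rw [show ((d : Int)) + 1 = ((d + 1 : Nat) : Int) by push_cast; ring,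
        hgetlow (d + 1) (by omega)]
      exact hneg d hdn a ha
    · have hdeq : d = n := by omega
      subst hdeq
      rw [hgetlow d le_rfl] at ha
      rw [hgettop]
      exact (hL _).2 (Or.inl ⟨a, ha, rfl⟩)
  · -- implication closure
    intro d i hd hi a ha b hb
    rcases Nat.lt_or_ge d n with hdn | hdn
    · rw [hgetlow i (by omega)] at ha
      rw [hgetlow d (by omega)] at hb
      rw [show ((d : Int)) + 1 = ((d + 1 : Nat) : Int) by push_cast; ring,
        hgetlow (d + 1) (by omega)]
      exact himp d i hdn hi a ha b hb
    · have hdeq : d = n := by omega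
      subst hdeq
      rw [hgetlow i hi] at ha
      rw [hgetlow d le_rfl] at hb
      rw [hgettop]
      constructor
      · exact (hL _).2 (Or.inr ⟨(i : Int), ⟨by omega, by omega⟩, Or.inl ⟨a, ha, b, hb, rfl⟩⟩)
      · rcases Nat.lt_or_ge i d with hin | hin
        · exact (hL _).2 (Or.inr ⟨(i : Int), ⟨by omega, by omega⟩,
            Or.inr ⟨by omega, b, hb, a, ha, rfl⟩⟩)
        · have hieq : i = d := by omega
          subst hieq
          exact (hL _).2 (Or.inr ⟨(i : Int), ⟨by omega, by omega⟩, Or.inl ⟨b, hb, a, ha, rfl⟩⟩)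
  · -- all_wffs = union of the stored layers
    intro x
    rw [PySem.Set.mem_update]
    constructor
    · rintro (hx | hx)
      · obtain ⟨d, hd, hxd⟩ := (hall x).1 hx
        exact ⟨d, by omega, by rw [hgetlow d hd]; exact hxd⟩
      · exact ⟨n + 1, le_rfl,
          by rw [show ((n + 1 : Nat) : Int) = (n : Int) + 1 by push_cast; ring, hgettop]; exact hx⟩
    · rintro ⟨d, hd, hxd⟩
      rcases Nat.lt_or_ge d (n + 1) with hdn | hdn
      · rw [hgetlow d (by omega)] at hxd
        exact Or.inl ((hall x).2 ⟨d, by omega, hxd⟩)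
      · have hdeq : d = n + 1 := by omega
        subst hdeq
        rw [show ((n + 1 : Nat) : Int) = (n : Int) + 1 by push_cast; ring, hgettop] at hxd
        exact Or.inr hxd
  · -- all_wffs = the WFFs of depth ≤ n + 1
    intro x
    rw [PySem.Set.mem_update, pvC_succ]
    constructor
    · rintro (hx | hx)
      · exact Or.inl ((hC x).1 hx)
      · exact (pvC_succ n x).1 (hLsound x hx)
    · rintro (hx | ⟨a, hca, rfl⟩ | ⟨a, b, hca, hcb, rfl⟩)
      · exact Or.inl ((hC x).2 hx)
      · obtain ⟨d, hd, had⟩ := (hall a).1 ((hC a).2 hca)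
        rcases Nat.lt_or_ge d n with hdn | hdn
        · exact Or.inl ((hall _).2 ⟨d + 1, by omega,
            by rw [show ((d + 1 : Nat) : Int) = (d : Int) + 1 by push_cast; ring]
               exact hneg d hdn a had⟩)
        · have hdeq : d = n := by omega
          subst hdeq
          exact Or.inr ((hL _).2 (Or.inl ⟨a, had, rfl⟩))
      · obtain ⟨di, hdi, hai⟩ := (hall a).1 ((hC a).2 hca)
        obtain ⟨dj, hdj, hbj⟩ := (hall b).1 ((hC b).2 hcb)
        rcases Nat.lt_or_ge dj n with hjn | hjn
        · rcases Nat.lt_or_ge di n with hin2 | hin2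
          · rcases Nat.le_total di dj with hle | hle
            · exact Or.inl ((hall _).2 ⟨dj + 1, by omega,
                by rw [show ((dj + 1 : Nat) : Int) = (dj : Int) + 1 by push_cast; ring]
                   exact (himp dj di hjn hle a hai b hbj).1⟩)
            · exact Or.inl ((hall _).2 ⟨di + 1, by omega,
                by rw [show ((di + 1 : Nat) : Int) = (di : Int) + 1 by push_cast; ring]
                   exact (himp di dj hin2 hle b hbj a hai).2⟩)
          · have hdeq : di = n := by omega
            subst hdeq
            exact Or.inr ((hL _).2 (Or.inr ⟨(dj : Int), ⟨by omega, by omega⟩,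
              Or.inr ⟨by omega, a, hai, b, hbj, rfl⟩⟩))
        · have hdeq : dj = n := by omega
          subst hdeq
          exact Or.inr ((hL _).2 (Or.inr ⟨(di : Int), ⟨by omega, by omega⟩,
            Or.inl ⟨a, hai, b, hbj, rfl⟩⟩))

lemma pvInv_stateA (n : Nat) :
    pvInv n ((PySem.List.pyRange 1 ((n : Int) + 1) 1).foldl pvStepA pvInitA) := by
  induction n with
  | zero =>
    rw [show ((0 : Nat) : Int) + 1 = 1 by norm_num,
      PySem.List.pyRange_one_eq_nil (by omega)]
    exact pvInv_zero
  | succ n ih =>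
    rw [show (((n + 1 : Nat)) : Int) + 1 = ((n : Int) + 1) + 1 by push_cast; ring,
      PySem.List.pyRange_one_succ_right (by omega), List.foldl_append]
    simp only [List.foldl_cons, List.foldl_nil]
    exact pvInv_step n _ ih

lemma pv_stateB (n : Nat) :
    (∀ x, x ∈ (PySem.List.pyRange 0 (n : Int) 1).foldl pvStepB (PySem.Set.ofList ["a", "b"]) ↔
        pvC n x) ∧
    ((PySem.List.pyRange 0 (n : Int) 1).foldl pvStepB (PySem.Set.ofList ["a", "b"])).Nodup := by
  induction n with
  | zero =>
    rw [show ((0 : Nat) : Int) = 0 by norm_num, PySem.List.pyRange_one_eq_nil (by omega)]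
    constructor
    · intro x; simp [pvC, PySem.Set.mem_ofList]
    · exact PySem.Set.nodup_ofList _
  | succ n ih =>
    obtain ⟨hmem, hnd⟩ := ih
    rw [show (((n + 1 : Nat)) : Int) = (n : Int) + 1 by push_cast; ring,
      PySem.List.pyRange_one_succ_right (by omega), List.foldl_append]
    simp only [List.foldl_cons, List.foldl_nil]
    constructor
    · intro x
      simp only [pvStepB, PySem.Set.mem_union, PySem.Set.mem_foldl_add,
        pv_mem_foldl_add2, hmem, pvC, PySem.Set.empty]
      simp
    · exact PySem.Set.nodup_union _ _ hnd

-- ===== VERDICT (by name: the statement is the Claim_ definition above) =====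
theorem generate_wff_basis_spec : Claim_equal_generate_wff_basis := by
  intro max_depth _
  unfold Spec_generate_wff_basis generate_wff_basis generate_wff_basis_alt
  dsimp only
  by_cases hpos : 0 < max_depth
  · obtain ⟨n, rfl⟩ : ∃ n : Nat, max_depth = (n : Int) :=
      ⟨max_depth.toNat, (Int.toNat_of_nonneg (le_of_lt hpos)).symm⟩
    obtain ⟨-, -, -, -, hCA, hndA⟩ := pvInv_stateA n
    obtain ⟨hCB, hndB⟩ := pv_stateB n
    rw [PySem.List.sorted_id_eq_sorted_id_iff_perm]
    exact (List.perm_ext_iff_of_nodup hndA hndB).2 (fun x => (hCA x).trans (hCB x).symm)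
  · rw [Int.not_lt] at hpos
    rw [PySem.List.pyRange_one_eq_nil (a := 1) (by omega),
      PySem.List.pyRange_one_eq_nil (a := 0) (by omega)]
    simp only [List.foldl_nil]
    rw [PySem.Set.ofList_ofList]
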